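-- pv_equiv track=rewrite | github.com/sounmind/algorithm-practice-collection | level_1/Pg_12930.py | solution
-- ===== SOURCE A (Python) =====
-- def solution(s):
--     answer = ''
--     s = s.split(" ")
--     for word in s:
--         for i, char in enumerate(word):
--             answer += char.upper() if i%2==0 else char.lower()
--         answer += ' '
--     return answer[:-1]+"end"
-- ===== SOURCE B (Python) =====
-- def solution(s):
--     out = []
--     i = 0
--     for ch in s:
--         if ch == ' ':
--             out.append(' ')
--             i = 0
--         else:
--             out.append(ch.upper() if i % 2 == 0 else ch.lower())
--             i += 1
--     return ''.join(out) + "end"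
-- ===== Notes on version B (the rewrite author's own statement) =====
-- stated objective: simpler
-- what changed: Replaces split-into-words plus nested enumerate loops plus trailing-space slice with one left-to-right scan keeping a parity counter that resets at each space, so no word list, no inner loop and no [:-1] fix-up are needed.
import Mathlib
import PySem

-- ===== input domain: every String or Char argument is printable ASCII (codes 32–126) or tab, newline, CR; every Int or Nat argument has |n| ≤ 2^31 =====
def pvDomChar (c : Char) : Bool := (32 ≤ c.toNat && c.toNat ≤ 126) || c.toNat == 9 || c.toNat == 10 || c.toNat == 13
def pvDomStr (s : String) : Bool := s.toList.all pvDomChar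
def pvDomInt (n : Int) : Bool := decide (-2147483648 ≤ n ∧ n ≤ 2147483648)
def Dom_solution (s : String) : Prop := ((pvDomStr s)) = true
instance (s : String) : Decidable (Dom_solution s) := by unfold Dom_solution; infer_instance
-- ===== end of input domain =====

-- B replaces A's split-into-words + nested enumerate loops + trailing-space slice by one
-- left-to-right scan with a parity counter that resets at each space (objective: simpler).

-- ===== PORT A =====
def solution (s : String) : String :=
  String.ofList
    (PySem.List.slice
      ((PySem.Chars.splitOn s.toList " ".toList).foldl (fun answer word =>
        ((PySem.List.enumerate word 0).foldl (fun a p =>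
          a ++ [if PySem.Int.mod p.1 2 == 0 then PySem.Chars.upperChar p.2
                else PySem.Chars.lowerChar p.2]) answer) ++ [' ']) [])
      none (some (-1)) ++ "end".toList)

-- ===== PORT B =====
def solution_alt (s : String) : String :=
  String.ofList
    ((s.toList.foldl (fun (st : List Char × Nat) ch =>
        if ch == ' ' then (st.1 ++ [' '], 0)
        else (st.1 ++ [if st.2 % 2 == 0 then PySem.Chars.upperChar ch
                       else PySem.Chars.lowerChar ch], st.2 + 1))
      ([], 0)).1 ++ "end".toList)

-- ===== PRECONDITION & SPEC =====
def Spec_solution (s : String) (out : String) : Prop := out = solution_alt s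
instance (s : String) (out : String) : Decidable (Spec_solution s out) := by unfold Spec_solution; infer_instance

-- ===== CLAIM (what is proved, stated in full; the proofs are below) =====
def Claim_equal_solution : Prop := ∀ (s : String), Dom_solution s → Spec_solution s (solution s)

-- ===== LEMMAS AND PROOFS =====

-- zigzag-case a word, starting the parity counter at i
def zc (i : Nat) (c : Char) : Char :=
  if i % 2 == 0 then PySem.Chars.upperChar c else PySem.Chars.lowerChar c

def zigFrom (i : Nat) : List Char → List Char
  | [] => []
  | c :: t => zc i c :: zigFrom (i + 1) t

-- structural characterisation of s.split(" ")
def mySplit : List Char → List (List Char)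
  | [] => [[]]
  | c :: t =>
    if c = ' ' then [] :: mySplit t
    else match mySplit t with
      | [] => [[c]]
      | w :: ws => (c :: w) :: ws

def consHead (p : List Char) : List (List Char) → List (List Char)
  | [] => [p]
  | w :: ws => (p ++ w) :: ws

-- A's words joined by single spaces, first word's counter starting at i
def zjoin (i : Nat) : List (List Char) → List Char
  | [] => []
  | [w] => zigFrom i w
  | w :: ws => zigFrom i w ++ ' ' :: zjoin 0 ws

-- B's output characters, counter starting at i
def Bcore (i : Nat) : List Char → List Char
  | [] => []
  | c :: t => if c = ' ' then ' ' :: Bcore 0 t else zc i c :: Bcore (i + 1) t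

-- final value of B's counter
def cntEnd (i : Nat) : List Char → Nat
  | [] => i
  | c :: t => if c = ' ' then cntEnd 0 t else cntEnd (i + 1) t

theorem mySplit_ne_nil (l : List Char) : mySplit l ≠ [] := by
  cases l with
  | nil => simp [mySplit]
  | cons c t =>
    simp only [mySplit]
    split
    · simp
    · split <;> simp

theorem go_eq (fuel : Nat) (l cur : List Char) (acc : List (List Char))
    (h : l.length < fuel) :
    PySem.Chars.splitOn.go [' '] fuel l cur acc
      = acc.reverse ++ consHead cur.reverse (mySplit l) := by
  induction fuel generalizing l cur acc with
  | zero => omega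
  | succ f ih =>
    cases l with
    | nil => simp [PySem.Chars.splitOn.go, mySplit, consHead]
    | cons c rest =>
      by_cases hc : c = ' '
      · subst hc
        have hp : [' '].isPrefixOf (' ' :: rest) = true := by
          simp [List.isPrefixOf]
        rw [PySem.Chars.splitOn.go]
        simp only [hp, if_true, List.length_singleton, List.drop_succ_cons,
          List.drop_zero]
        rw [ih rest [] (cur.reverse :: acc) (by simpa using Nat.lt_of_succ_lt_succ (by simpa using h))]
        have hne := mySplit_ne_nil rest
        cases hms : mySplit rest with
        | nil => exact absurd hms hne
        | cons w ws => simp [mySplit, hms, consHead]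
      · have hp : [' '].isPrefixOf (c :: rest) = false := by
          simp [List.isPrefixOf, Ne.symm hc]
        rw [PySem.Chars.splitOn.go]
        simp only [hp, Bool.false_eq_true, if_false]
        rw [ih rest (c :: cur) acc (by simpa using Nat.lt_of_succ_lt_succ (by simpa using h))]
        have hne := mySplit_ne_nil rest
        cases hms : mySplit rest with
        | nil => exact absurd hms hne
        | cons w ws => simp [mySplit, hms, hc, consHead, List.reverse_cons]

theorem splitOn_space (l : List Char) :
    PySem.Chars.splitOn l [' '] = mySplit l := by
  rw [PySem.Chars.splitOn, go_eq (l.length + 1) l [] [] (by omega)]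
  have hne := mySplit_ne_nil l
  cases hms : mySplit l with
  | nil => exact absurd hms hne
  | cons w ws => simp [consHead]

theorem enum_map (w : List Char) (n : Nat) :
    (PySem.List.enumerate w (n : Int)).map (fun p =>
        if PySem.Int.mod p.1 2 == 0 then PySem.Chars.upperChar p.2
        else PySem.Chars.lowerChar p.2) = zigFrom n w := by
  induction w generalizing n with
  | nil => simp [PySem.List.enumerate, zigFrom]
  | cons c t ih =>
    rw [PySem.List.enumerate_cons]
    have hcast : (n : Int) + 1 = ((n + 1 : Nat) : Int) := by push_cast; ring
    have hmod : PySem.Int.mod (n : Int) 2 = ((n % 2 : Nat) : Int) := by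
      exact_mod_cast PySem.Int.mod_natCast n 2
    rw [List.map_cons, hcast, ih]
    simp only [zigFrom]
    rcases Nat.mod_two_eq_zero_or_one n with h | h <;>
      · rw [hmod, h]; simp [zc, h]

theorem flat_dropLast (ws : List (List Char)) (h : ws ≠ []) :
    (ws.flatMap (fun w => zigFrom 0 w ++ [' '])).dropLast = zjoin 0 ws := by
  induction ws with
  | nil => exact absurd rfl h
  | cons w rest ih =>
    cases rest with
    | nil => simp [zjoin]
    | cons w2 t =>
      have hne : ((w2 :: t).flatMap (fun w => zigFrom 0 w ++ [' '])) ≠ [] := by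
        simp [List.flatMap_cons]
      rw [List.flatMap_cons, List.dropLast_append_of_ne_nil hne, ih (by simp)]
      simp [zjoin]

theorem zjoin_mySplit (l : List Char) (i : Nat) :
    zjoin i (mySplit l) = Bcore i l := by
  induction l generalizing i with
  | nil => simp [mySplit, zjoin, zigFrom, Bcore]
  | cons c t ih =>
    by_cases hc : c = ' '
    · subst hc
      have hne := mySplit_ne_nil t
      cases hms : mySplit t with
      | nil => exact absurd hms hne
      | cons w ws =>
        simp only [mySplit, hms, Bcore]
        cases ws with
        | nil => simp [zjoin, zigFrom, ← hms, ih]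
        | cons w2 t2 => simp [zjoin, zigFrom, ← hms, ih]
    · have hne := mySplit_ne_nil t
      cases hms : mySplit t with
      | nil => exact absurd hms hne
      | cons w ws =>
        have h2 := ih (i + 1)
        rw [hms] at h2
        simp only [mySplit, hc, if_false, hms, Bcore]
        cases ws with
        | nil =>
          simp only [zjoin] at h2
          simp [zjoin, zigFrom, h2]
        | cons w2 t2 =>
          simp only [zjoin] at h2
          simp only [zjoin, zigFrom, List.cons_append, h2]

theorem Bfold (l : List Char) (acc : List Char) (i : Nat) :
    l.foldl (fun (st : List Char × Nat) ch =>
      if ch == ' ' then (st.1 ++ [' '], 0)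
      else (st.1 ++ [if st.2 % 2 == 0 then PySem.Chars.upperChar ch
                     else PySem.Chars.lowerChar ch], st.2 + 1)) (acc, i)
    = (acc ++ Bcore i l, cntEnd i l) := by
  induction l generalizing acc i with
  | nil => simp [Bcore, cntEnd]
  | cons c t ih =>
    rw [List.foldl_cons]
    by_cases hc : c = ' '
    · rw [if_pos (by simp [hc]), ih]
      simp [Bcore, cntEnd, hc]
    · rw [if_neg (by simp [hc]), ih]
      simp [Bcore, cntEnd, hc, zc]

-- ===== VERDICT (by name: the statement is the Claim_ definition above) =====
theorem solution_spec : Claim_equal_solution := by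
  intro s _
  unfold Spec_solution solution solution_alt
  rw [Bfold]
  have h1 : ∀ (acc : List Char),
      ∀ w ∈ PySem.Chars.splitOn s.toList " ".toList,
      ((PySem.List.enumerate w 0).foldl (fun a p =>
          a ++ [if PySem.Int.mod p.1 2 == 0 then PySem.Chars.upperChar p.2
                else PySem.Chars.lowerChar p.2]) acc) ++ [' ']
        = acc ++ (zigFrom 0 w ++ [' ']) := by
    intro acc w _
    rw [PySem.List.foldl_append_singleton_eq_map
      (fun p : Int × Char =>
        if PySem.Int.mod p.1 2 == 0 then PySem.Chars.upperChar p.2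
        else PySem.Chars.lowerChar p.2) (PySem.List.enumerate w 0) acc]
    have h0 := enum_map w 0
    simp only [Nat.cast_zero] at h0
    rw [h0, List.append_assoc]
  rw [PySem.List.foldl_congr_mem _ _ _ _ h1,
    PySem.List.foldl_append_eq_flatMap (fun w => zigFrom 0 w ++ [' ']),
    PySem.List.slice_to_neg_one, List.nil_append,
    show (" ".toList : List Char) = [' '] from by decide,
    splitOn_space, flat_dropLast _ (mySplit_ne_nil s.toList), zjoin_mySplit]
  simp
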